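-- pv_equiv track=rewrite | github.com/Sebaestschjin/advent-of-code | 2020/16 - Ticket Translation/solver.py | get_valid_rule_combinations
-- ===== SOURCE A (Python) =====
-- def get_valid_rule_combinations(possible_rules, index, already_used):
--     if index >= len(possible_rules):
--         return already_used
--
--     already_used_names = [name for name, _ in already_used]
--     available_rules = [(name, index) for name, index in possible_rules[index] if name not in already_used_names]
--     if not available_rules:
--         return None
--
--     for available in available_rules:
--         next_already_used = already_used + [available]
--         next_valid = get_valid_rule_combinations(possible_rules, index + 1, next_already_used)
--         if next_valid:
--             return next_valid
--
--     return None
-- ===== SOURCE B (Python) =====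
-- def get_valid_rule_combinations(possible_rules, index, already_used):
--     n = len(possible_rules)
--     stack = [(index, already_used)]
--     while stack:
--         i, used = stack.pop()
--         if i >= n:
--             return used
--         used_names = {name for name, _ in used}
--         extensions = [(name, idx) for name, idx in possible_rules[i] if name not in used_names]
--         for ext in reversed(extensions):
--             stack.append((i + 1, used + [ext]))
--     return None
-- ===== Notes on version B (the rewrite author's own statement) =====
-- stated objective: alternative
-- what changed: The recursive backtracking with an explicit per-node loop and early return is replaced by an iterative depth-first search over an explicit stack of partial states (index, already_used), pushing extensions in reverse so they are explored in the original left-to-right order.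
import Mathlib
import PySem

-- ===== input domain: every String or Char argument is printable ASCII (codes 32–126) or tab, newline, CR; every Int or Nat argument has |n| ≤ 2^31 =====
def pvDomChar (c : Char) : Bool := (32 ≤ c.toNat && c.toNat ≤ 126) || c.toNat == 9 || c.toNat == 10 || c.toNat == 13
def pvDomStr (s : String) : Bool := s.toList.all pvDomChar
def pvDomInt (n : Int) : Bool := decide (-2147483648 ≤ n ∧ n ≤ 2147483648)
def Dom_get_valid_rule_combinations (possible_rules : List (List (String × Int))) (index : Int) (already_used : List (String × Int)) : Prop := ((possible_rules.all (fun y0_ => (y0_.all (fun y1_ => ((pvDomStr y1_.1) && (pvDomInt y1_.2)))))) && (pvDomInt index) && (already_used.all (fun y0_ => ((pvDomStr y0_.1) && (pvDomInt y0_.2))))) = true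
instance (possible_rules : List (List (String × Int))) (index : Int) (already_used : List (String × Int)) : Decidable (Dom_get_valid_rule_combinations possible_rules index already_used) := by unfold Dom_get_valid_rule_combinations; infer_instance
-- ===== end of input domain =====

-- B replaces A's recursive backtracking by an iterative depth-first search over an explicit
-- stack of partial states (same search order, same results; no speed claim).

-- ===== PORT A =====
-- Literal port of A: recursive backtracking; the for-loop with its early return on a
-- truthy recursive result is List.findSome? with falsy results mapped to none.
def get_valid_rule_combinations (possible_rules : List (List (String × Int))) (index : Int) (already_used : List (String × Int)) : Option (List (String × Int)) :=
  if _h : (possible_rules.length : Int) ≤ index then some already_used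
  else
    match PySem.List.pyGet? possible_rules index with
    | none => none  -- IndexError in Python (index < -len); excluded by Pre_
    | some rules =>
      let already_used_names := already_used.map Prod.fst
      let available_rules := rules.filter (fun p => !(already_used_names.contains p.1))
      if available_rules = [] then none
      else
        available_rules.findSome? (fun available =>
          match get_valid_rule_combinations possible_rules (index + 1) (already_used ++ [available]) with
          | some l => if l = [] then none else some l   -- `if next_valid:` truthiness
          | none => none)
termination_by (possible_rules.length - index).toNat
decreasing_by omega

-- ===== PORT B =====
-- B-side helpers for the termination measure of the stack loop (cited in decreasing_by).
def gvrc_maxlen (prs : List (List (String × Int))) : Nat := (prs.map List.length).foldr Nat.max 0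

lemma gvrc_le_maxlen (prs : List (List (String × Int))) (l : List (String × Int)) (h : l ∈ prs) :
    l.length ≤ gvrc_maxlen prs := by
  unfold gvrc_maxlen
  induction prs with
  | nil => simp at h
  | cons a t ih =>
    simp only [List.map_cons, List.foldr_cons]
    rcases List.mem_cons.mp h with rfl | hm
    · exact Nat.le_max_left _ _
    · exact le_trans (ih hm) (Nat.le_max_right _ _)

-- `for ext in reversed(extensions): stack.append(…)` followed by popping from the top
-- is the same stack as consing the mapped extensions in order.
lemma gvrc_push_rev {α β : Type} (f : α → β) (l : List α) (r : List β) :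
    l.reverse.foldl (fun st e => f e :: st) r = l.map f ++ r := by
  rw [List.foldl_reverse]
  induction l with
  | nil => rfl
  | cons a t ih => simp [ih]

lemma gvrc_key {α : Type} (M len : Nat) (i : Int) (hi : i < (len : Int)) (exts : List α)
    (hlen : exts.length ≤ M) (g : α → Int × List (String × Int)) (hg : ∀ e, (g e).1 = i + 1)
    (T : Nat) :
    (exts.map (fun e => (M + 1) ^ (((len : Int)) - (g e).1).toNat)).sum + T
      < (M + 1) ^ (((len : Int) - i).toNat) + T := by
  have hrw : (exts.map (fun e => (M + 1) ^ (((len : Int)) - (g e).1).toNat))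
      = exts.map (fun _ => (M + 1) ^ (((len : Int)) - (i + 1)).toNat) := by
    apply List.map_congr_left
    intro e _
    rw [hg]
  rw [hrw, List.map_const', List.sum_replicate, smul_eq_mul]
  have hpow : 0 < (M + 1) ^ (((len : Int)) - (i + 1)).toNat := pow_pos (Nat.succ_pos _) _
  have hk : (((len : Int)) - i).toNat = (((len : Int)) - (i + 1)).toNat + 1 := by omega
  have : exts.length * (M + 1) ^ (((len : Int)) - (i + 1)).toNat
      < (M + 1) ^ (((len : Int) - i).toNat) := by
    rw [hk, pow_succ']
    exact Nat.mul_lt_mul_of_lt_of_le (Nat.lt_succ_of_le hlen) (le_refl _) hpow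
  omega

-- The while-loop of Source B over the explicit stack (head = top of stack).
def gvrc_drain (possible_rules : List (List (String × Int))) :
    List (Int × List (String × Int)) → Option (List (String × Int))
  | [] => none
  | (i, used) :: rest =>
    if _h : (possible_rules.length : Int) ≤ i then some used
    else
      match hg : PySem.List.pyGet? possible_rules i with
      | none => gvrc_drain possible_rules rest  -- IndexError in Python; outside Pre_
      | some rules =>
        let used_names : PySem.Set String := PySem.Set.ofList (used.map Prod.fst)
        let extensions := rules.filter (fun p => !(PySem.Set.contains used_names p.1))
        gvrc_drain possible_rules
          (extensions.reverse.foldl (fun st e => (i + 1, used ++ [e]) :: st) rest)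
termination_by st =>
  (st.map (fun s => (gvrc_maxlen possible_rules + 1) ^ (((possible_rules.length : Int) - s.1).toNat))).sum
decreasing_by
  · simp only [List.map_cons, List.sum_cons]
    have : 0 < (gvrc_maxlen possible_rules + 1) ^ (((possible_rules.length : Int) - i).toNat) :=
      pow_pos (Nat.succ_pos _) _
    omega
  · rw [gvrc_push_rev]
    simp only [List.map_cons, List.sum_cons, List.map_append, List.sum_append, List.map_map]
    exact gvrc_key _ _ _ (by omega) _
      (le_trans (List.length_filter_le _ _)
        (gvrc_le_maxlen possible_rules _ (PySem.List.mem_of_pyGet?_eq_some possible_rules hg)))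
      (fun e => (i + 1, used ++ [e])) (fun _ => rfl) _

def get_valid_rule_combinations_alt (possible_rules : List (List (String × Int))) (index : Int) (already_used : List (String × Int)) : Option (List (String × Int)) :=
  gvrc_drain possible_rules [(index, already_used)]

-- ===== PRECONDITION & SPEC =====
-- Pre_ excludes exactly index < -len(possible_rules), where Python A raises IndexError
-- on possible_rules[index] (B raises the same way there).
def Pre_get_valid_rule_combinations (possible_rules : List (List (String × Int))) (index : Int) (already_used : List (String × Int)) : Prop :=
  -(possible_rules.length : Int) ≤ index
instance (possible_rules : List (List (String × Int))) (index : Int) (already_used : List (String × Int)) : Decidable (Pre_get_valid_rule_combinations possible_rules index already_used) := by unfold Pre_get_valid_rule_combinations; infer_instance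
def pvWitness_get_valid_rule_combinations : (List (List (String × Int))) × Int × (List (String × Int)) :=
  ([[("row", 0)], [("seat", 1)]], 0, [])

def Spec_get_valid_rule_combinations (possible_rules : List (List (String × Int))) (index : Int) (already_used : List (String × Int)) (out : Option (List (String × Int))) : Prop := out = get_valid_rule_combinations_alt possible_rules index already_used
instance (possible_rules : List (List (String × Int))) (index : Int) (already_used : List (String × Int)) (out : Option (List (String × Int))) : Decidable (Spec_get_valid_rule_combinations possible_rules index already_used out) := by unfold Spec_get_valid_rule_combinations; infer_instance

-- ===== CLAIM (what is proved, stated in full; the proofs are below) =====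
def Claim_equal_get_valid_rule_combinations : Prop := ∀ (possible_rules : List (List (String × Int))) (index : Int) (already_used : List (String × Int)), Dom_get_valid_rule_combinations possible_rules index already_used → Pre_get_valid_rule_combinations possible_rules index already_used → Spec_get_valid_rule_combinations possible_rules index already_used (get_valid_rule_combinations possible_rules index already_used)

-- ===== LEMMAS AND PROOFS =====

-- A's result is its argument `already_used` (base case) or a nonempty list.
lemma gvrc_A_some (prs : List (List (String × Int))) (i : Int) (u l : List (String × Int))
    (h : get_valid_rule_combinations prs i u = some l) : l = u ∨ l ≠ [] := by
  rw [get_valid_rule_combinations] at h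
  split at h
  · exact Or.inl (Option.some.inj h).symm
  · split at h
    · exact absurd h (by simp)
    · simp only at h
      split at h
      · exact absurd h (by simp)
      · obtain ⟨e, _, hfe⟩ := List.exists_of_findSome?_eq_some h
        refine Or.inr ?_
        split at hfe
        · split at hfe
          · exact absurd hfe (by simp)
          · rename_i l' hl'
            cases hfe
            assumption
        · exact absurd hfe (by simp)

-- "first truthy result over the explored states", the reference run of A down a stack
def gvrc_firstA (prs : List (List (String × Int))) :
    List (Int × List (String × Int)) → Option (List (String × Int))
  | [] => none
  | (i, u) :: r =>
    match get_valid_rule_combinations prs i u with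
    | some l => some l
    | none => gvrc_firstA prs r

lemma gvrc_firstA_pushed (prs : List (List (String × Int))) (i : Int) (u : List (String × Int))
    (exts : List (String × Int)) (rest : List (Int × List (String × Int))) :
    gvrc_firstA prs (exts.map (fun e => (i + 1, u ++ [e])) ++ rest)
      = match exts.findSome? (fun e =>
          match get_valid_rule_combinations prs (i + 1) (u ++ [e]) with
          | some l => if l = [] then none else some l
          | none => none) with
        | some l => some l
        | none => gvrc_firstA prs rest := by
  induction exts with
  | nil => simp
  | cons e t ih =>
    simp only [List.map_cons, List.cons_append, List.findSome?_cons]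
    cases hA : get_valid_rule_combinations prs (i + 1) (u ++ [e]) with
    | none => simp [gvrc_firstA, hA, ih]
    | some l =>
      have hl : l ≠ [] := by
        rcases gvrc_A_some prs (i + 1) (u ++ [e]) l hA with h | h
        · subst h; simp
        · exact h
      simp [gvrc_firstA, hA, hl]

lemma gvrc_drain_eq_firstA (prs : List (List (String × Int)))
    (st : List (Int × List (String × Int))) (hne : ∀ s ∈ st, s.2 ≠ []) :
    gvrc_drain prs st = gvrc_firstA prs st := by
  revert hne
  induction st using gvrc_drain.induct (possible_rules := prs) with
  | case1 => intro _; simp [gvrc_drain, gvrc_firstA]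
  | case2 i used rest hle =>
    intro _
    rw [gvrc_drain, dif_pos hle]
    have hA : get_valid_rule_combinations prs i used = some used := by
      rw [get_valid_rule_combinations, dif_pos hle]
    simp [gvrc_firstA, hA]
  | case3 i used rest hle hgnone ih =>
    intro hne
    rw [gvrc_drain, dif_neg hle]
    split
    · rw [ih (fun s hs => hne s (List.mem_cons_of_mem _ hs))]
      have hA : get_valid_rule_combinations prs i used = none := by
        rw [get_valid_rule_combinations, dif_neg hle]
        simp [hgnone]
      simp [gvrc_firstA, hA]
    · rename_i rules heq
      rw [hgnone] at heq
      cases heq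
  | case4 i used rest hle rules hgsome un ext ih =>
    intro hne
    rw [gvrc_drain, dif_neg hle]
    split
    · rename_i heq
      rw [hgsome] at heq
      cases heq
    · rename_i rules' heq
      rw [hgsome] at heq
      injection heq with heq'
      subst heq'
      have hmapa : List.map (fun x : {x // x ∈ used} => match x with | ⟨x, _⟩ => x.1) used.attach
          = used.map Prod.fst := by
        rw [List.map_attach_eq_pmap, List.pmap_eq_map]
      have hu : un = PySem.Set.ofList (used.map Prod.fst) := by
        rw [show un = PySem.Set.ofList (List.map
          (fun x : {x // x ∈ used} => match x with | ⟨x, _⟩ => x.1) used.attach) from rfl, hmapa]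
      have hext : ext = List.filter
          (fun p => !(PySem.Set.contains (PySem.Set.ofList (used.map Prod.fst)) p.1)) rules := by
        rw [show ext = List.filter (fun p => !un.contains p.1) rules from rfl, hu]
      rw [hext] at ih
      have hne' : ∀ s ∈ List.foldl (fun st e => (i + 1, used ++ [e]) :: st) rest
          (List.filter (fun p => !(PySem.Set.contains (PySem.Set.ofList (used.map Prod.fst)) p.1))
            rules).reverse, s.2 ≠ [] := by
        rw [gvrc_push_rev]
        intro s hs
        rcases List.mem_append.mp hs with h | h
        · obtain ⟨e, _, rfl⟩ := List.mem_map.mp h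
          simp
        · exact hne s (List.mem_cons_of_mem _ h)
      have key := ih hne'
      rw [gvrc_push_rev] at key
      show gvrc_drain prs (List.foldl (fun st e => (i + 1, used ++ [e]) :: st) rest
          (List.filter (fun p => !(PySem.Set.contains (PySem.Set.ofList (used.map Prod.fst)) p.1))
            rules).reverse) = gvrc_firstA prs ((i, used) :: rest)
      rw [gvrc_push_rev, key, gvrc_firstA_pushed]
      have hfilter : List.filter
          (fun p => !(PySem.Set.contains (PySem.Set.ofList (used.map Prod.fst)) p.1)) rules
          = List.filter (fun p => !((used.map Prod.fst).contains p.1)) rules := by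
        apply List.filter_congr
        intro p _
        simp [PySem.Set.mem_ofList]
      rw [hfilter]
      have hA : get_valid_rule_combinations prs i used
          = if List.filter (fun p => !((used.map Prod.fst).contains p.1)) rules = [] then none
            else (List.filter (fun p => !((used.map Prod.fst).contains p.1)) rules).findSome?
              (fun available =>
                match get_valid_rule_combinations prs (i + 1) (used ++ [available]) with
                | some l => if l = [] then none else some l
                | none => none) := by
        rw [get_valid_rule_combinations, dif_neg hle]
        simp only [hgsome]
      simp only [gvrc_firstA, hA]
      by_cases hav : List.filter (fun p => !((used.map Prod.fst).contains p.1)) rules = []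
      · rw [if_pos hav, hav]
        simp
      · rw [if_neg hav]

lemma gvrc_main (prs : List (List (String × Int))) (i : Int) (u : List (String × Int)) :
    get_valid_rule_combinations prs i u = gvrc_drain prs [(i, u)] := by
  by_cases hle : (prs.length : Int) ≤ i
  · rw [get_valid_rule_combinations, dif_pos hle, gvrc_drain, dif_pos hle]
  · rw [get_valid_rule_combinations, dif_neg hle, gvrc_drain, dif_neg hle]
    cases hg : PySem.List.pyGet? prs i with
    | none => simp [gvrc_drain]
    | some rules =>
      show (if List.filter (fun p => !((u.map Prod.fst).contains p.1)) rules = [] then none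
            else (List.filter (fun p => !((u.map Prod.fst).contains p.1)) rules).findSome?
              (fun available =>
                match get_valid_rule_combinations prs (i + 1) (u ++ [available]) with
                | some l => if l = [] then none else some l
                | none => none))
          = gvrc_drain prs (List.foldl (fun st e => (i + 1, u ++ [e]) :: st) []
              (List.filter (fun p => !(PySem.Set.contains (PySem.Set.ofList (u.map Prod.fst)) p.1))
                rules).reverse)
      have hne' : ∀ s ∈ List.foldl (fun st e => (i + 1, u ++ [e]) :: st)
          ([] : List (Int × List (String × Int)))
          (List.filter (fun p => !(PySem.Set.contains (PySem.Set.ofList (u.map Prod.fst)) p.1))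
            rules).reverse, s.2 ≠ [] := by
        rw [gvrc_push_rev]
        intro s hs
        rcases List.mem_append.mp hs with h | h
        · obtain ⟨e, _, rfl⟩ := List.mem_map.mp h
          simp
        · simp at h
      rw [gvrc_drain_eq_firstA prs _ hne', gvrc_push_rev, gvrc_firstA_pushed]
      have hfilter : List.filter
          (fun p => !(PySem.Set.contains (PySem.Set.ofList (u.map Prod.fst)) p.1)) rules
          = List.filter (fun p => !((u.map Prod.fst).contains p.1)) rules := by
        apply List.filter_congr
        intro p _
        simp [PySem.Set.mem_ofList]
      rw [hfilter]
      by_cases hav : List.filter (fun p => !((u.map Prod.fst).contains p.1)) rules = []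
      · rw [if_pos hav, hav]
        simp [gvrc_firstA]
      · rw [if_neg hav]
        cases hfs : List.findSome? (fun available =>
            match get_valid_rule_combinations prs (i + 1) (u ++ [available]) with
            | some l => if l = [] then none else some l
            | none => none)
            (List.filter (fun p => !((u.map Prod.fst).contains p.1)) rules) with
        | none => simp [gvrc_firstA]
        | some l => rfl

-- ===== VERDICT (by name: the statement is the Claim_ definition above) =====
theorem get_valid_rule_combinations_spec : Claim_equal_get_valid_rule_combinations := by
  intro prs i u _ _
  unfold Spec_get_valid_rule_combinations get_valid_rule_combinations_alt
  exact gvrc_main prs i u
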